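-- pv_equiv track=rewrite | github.com/gabrielfeo/develocity-api-kotlin | .github/scripts/update_api_spec_version.py | get_possible_version_bumps
-- ===== SOURCE A (Python) =====
-- def get_possible_version_bumps(version: str) -> list[str]:
--     parts: list = version.split('.')
--     possible_bumps = []
--     for i in range(len(parts)):
--         bump = [int(p) for p in parts]
--         bump[i] += 1
--         if i < len(parts) - 1:
--             for j in range(i + 1, len(parts)):
--                 bump[j] = 0
--         bump = ".".join([str(part) for part in bump])
--         possible_bumps.append(bump)
--     return possible_bumps
-- ===== SOURCE B (Python) =====
-- def get_possible_version_bumps(version: str) -> list[str]: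
--     def bumps(parts):
--         if not parts:
--             return []
--         v = int(parts[0])
--         rest = parts[1:]
--         first = '.'.join([str(v + 1)] + ['0'] * len(rest))
--         return [first] + [str(v) + '.' + b for b in bumps(rest)]
--     return bumps(version.split('.'))
-- ===== Notes on version B (the rewrite author's own statement) =====
-- stated objective: alternative
-- what changed: B replaces A's index loop with per-index list copy + inner zeroing loop by a structural recursion on the split parts: the head's bump is built directly and all later bumps are the recursive results of the tail prefixed with the normalized head, so no indices or mutation appear at all.
import Mathlib
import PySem

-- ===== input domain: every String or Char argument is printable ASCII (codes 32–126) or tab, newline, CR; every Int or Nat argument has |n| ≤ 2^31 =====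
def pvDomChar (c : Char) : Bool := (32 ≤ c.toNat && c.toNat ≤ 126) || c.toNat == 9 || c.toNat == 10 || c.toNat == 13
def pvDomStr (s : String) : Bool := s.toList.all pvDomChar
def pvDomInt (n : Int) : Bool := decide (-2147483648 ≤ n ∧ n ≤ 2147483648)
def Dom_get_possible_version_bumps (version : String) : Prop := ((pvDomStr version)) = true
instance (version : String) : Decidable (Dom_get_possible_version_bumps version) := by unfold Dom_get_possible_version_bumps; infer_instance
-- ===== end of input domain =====

-- B replaces A's index loop (full int-list copy + inner zeroing loop per index) by a structural
-- recursion on the split parts: the head's bump is built directly and the tail's bumps are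
-- prefixed with the normalized head; same cost, no indices or mutation.

-- ===== PORT A =====
-- int(p): Pre_ restricts to parts where int() succeeds, so getD 0 is the total form under Pre_.
def get_possible_version_bumps (version : String) : List String :=
  let parts := (PySem.Str.split? version ".").getD []   -- the separator is a non-empty literal, so split? is always some
  (PySem.List.pyRange 0 (parts.length : Int) 1).foldl (fun possible_bumps i =>
    let bump := parts.map (fun p => (PySem.Int.ofStr? p).getD 0)
    let bump := PySem.List.pySetD bump i (PySem.List.pyGetD bump i 0 + 1)
    let bump := if i < (parts.length : Int) - 1 then
        (PySem.List.pyRange (i + 1) (parts.length : Int) 1).foldl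
          (fun b j => PySem.List.pySetD b j 0) bump
      else bump
    possible_bumps ++ [PySem.Str.join "." (bump.map PySem.Int.toStr)]) []

-- ===== PORT B =====
-- recursive helper 'bumps' of Source B; str + str is ported as String append (exact: concatenation)
def pvBumpsGo (parts : List String) : List String :=
  match parts with
  | [] => []
  | head :: rest =>
    let v := (PySem.Int.ofStr? head).getD 0
    let first := PySem.Str.join "." (PySem.Int.toStr (v + 1) :: List.replicate rest.length "0")
    first :: (pvBumpsGo rest).map (fun b => PySem.Int.toStr v ++ "." ++ b)

def get_possible_version_bumps_alt (version : String) : List String :=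
  pvBumpsGo ((PySem.Str.split? version ".").getD [])

-- ===== PRECONDITION & SPEC =====
-- Exactly the inputs where the Python A returns: int(p) must succeed for every '.'-separated part.
def Pre_get_possible_version_bumps (version : String) : Prop :=
  ∀ p ∈ (PySem.Str.split? version ".").getD [], (PySem.Int.ofStr? p).isSome = true
instance (version : String) : Decidable (Pre_get_possible_version_bumps version) := by
  unfold Pre_get_possible_version_bumps; infer_instance
def pvWitness_get_possible_version_bumps : String := "1.2.3"

def Spec_get_possible_version_bumps (version : String) (out : List String) : Prop := out = get_possible_version_bumps_alt version
instance (version : String) (out : List String) : Decidable (Spec_get_possible_version_bumps version out) := by unfold Spec_get_possible_version_bumps; infer_instance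

-- ===== CLAIM (what is proved, stated in full; the proofs are below) =====
def Claim_equal_get_possible_version_bumps : Prop := ∀ (version : String), Dom_get_possible_version_bumps version → Pre_get_possible_version_bumps version → Spec_get_possible_version_bumps version (get_possible_version_bumps version)

-- ===== LEMMAS AND PROOFS =====

-- common characterization: the bump string at index k
def pvF (p : String) : Int := (PySem.Int.ofStr? p).getD 0
def pvIdx (parts : List String) (k : Nat) : String :=
  PySem.Str.join "." (((parts.take k).map (fun p => PySem.Int.toStr (pvF p))) ++
    PySem.Int.toStr (pvF (parts.getD k "") + 1) :: List.replicate (parts.length - k - 1) "0")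

-- join with a non-empty tail peels off the head
theorem join_cons_ne_nil (sep a : String) (l : List String) (hl : l ≠ []) :
    PySem.Str.join sep (a :: l) = a ++ sep ++ PySem.Str.join sep l := by
  cases l with
  | nil => exact absurd rfl hl
  | cons b t =>
    apply String.ext
    simp [PySem.Str.join, PySem.Chars.join_cons_cons]

-- B equals the characterization
theorem pvBumpsGo_eq (parts : List String) :
    pvBumpsGo parts = (List.range parts.length).map (pvIdx parts) := by
  induction parts with
  | nil => simp [pvBumpsGo]
  | cons head rest ih =>
    simp only [pvBumpsGo, List.length_cons, List.range_succ_eq_map, List.map_cons, List.map_map]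
    congr 1
    rw [ih, List.map_map]
    apply List.map_congr_left
    intro k hk
    have hk' : k < rest.length := List.mem_range.mp hk
    simp only [Function.comp_def, pvIdx]
    have hne : (((head :: rest).take (k + 1)).map (fun p => PySem.Int.toStr (pvF p))) ++
        PySem.Int.toStr (pvF ((head :: rest).getD (k+1) "") + 1) ::
          List.replicate ((head :: rest).length - (k+1) - 1) "0"
        = PySem.Int.toStr (pvF head) ::
          (((rest.take k).map (fun p => PySem.Int.toStr (pvF p))) ++
            PySem.Int.toStr (pvF (rest.getD k "") + 1) ::
              List.replicate (rest.length - k - 1) "0") := by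
      simp [List.take_succ_cons]
    rw [hne, join_cons_ne_nil _ _ _ (by simp)]
    simp [pvF]

-- take (k+1) of a list set at k
theorem take_succ_set (l : List Int) (k : Nat) (v : Int) (hk : k < l.length) :
    (l.set k v).take (k + 1) = l.take k ++ [v] := by
  rw [List.set_eq_take_append_cons_drop]
  simp only [hk, if_true]
  rw [List.take_append]
  have h1 : (l.take k).length = k := by simp [Nat.min_eq_left (le_of_lt hk)]
  rw [List.take_take, h1]
  have : min (k+1) k = k := by omega
  rw [this, Nat.add_sub_cancel_left, List.take_cons (by omega)]
  simp

-- A's inner zeroing loop writes 0 at indices k, k+1, …, length-1.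
theorem zero_fold (l : List Int) (k : Nat) (hk : k ≤ l.length) :
    (PySem.List.pyRange (k : Int) (l.length : Int) 1).foldl
      (fun b j => PySem.List.pySetD b j 0) l
    = l.take k ++ List.replicate (l.length - k) 0 := by
  induction hn : l.length - k generalizing l k with
  | zero =>
      have hkl : k = l.length := by omega
      rw [PySem.List.pyRange_one_eq_nil (by omega)]
      simp [hkl]
  | succ m ih =>
      have hklt : k < l.length := by omega
      rw [PySem.List.pyRange_one_cons (by exact_mod_cast hklt)]
      simp only [List.foldl_cons]
      rw [PySem.List.pySetD_natCast]
      have hlen : (l.set k 0).length = l.length := by simp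
      have h1 : ((k : Int) + 1) = ((k + 1 : Nat) : Int) := by push_cast; ring
      rw [h1, ← hlen, ih (l.set k 0) (k + 1) (by omega) (by omega)]
      rw [take_succ_set l k 0 hklt, List.append_assoc]
      simp [List.replicate_succ]

-- A's element at index k equals the characterization
theorem a_elem (parts : List String) (k : Nat) (hklt : k < parts.length) :
    (let bump := parts.map pvF
     let bump := PySem.List.pySetD bump (k : Int) (PySem.List.pyGetD bump (k : Int) 0 + 1)
     let bump := if (k : Int) < (parts.length : Int) - 1 then
         (PySem.List.pyRange ((k : Int) + 1) (parts.length : Int) 1).foldl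
           (fun b j => PySem.List.pySetD b j 0) bump
       else bump
     PySem.Str.join "." (bump.map PySem.Int.toStr)) = pvIdx parts k := by
  simp only []
  set f := pvF with hf
  have hget : PySem.List.pyGetD (parts.map f) (k : Int) 0 = f parts[k] := by
    rw [PySem.List.pyGetD_eq_getElem _ _ (Int.natCast_nonneg k) (by simp only [List.length_map]; exact_mod_cast hklt)]
    simp
  have hset : PySem.List.pySetD (parts.map f) (k : Int) (PySem.List.pyGetD (parts.map f) (k : Int) 0 + 1)
      = (parts.map f).set k (f parts[k] + 1) := by
    rw [hget, PySem.List.pySetD_natCast]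
  have hsetlen : ((parts.map f).set k (f parts[k] + 1)).length = parts.length := by simp
  have hAfinal :
      (if (k : Int) < (parts.length : Int) - 1 then
        (PySem.List.pyRange ((k : Int) + 1) (parts.length : Int) 1).foldl
          (fun b j => PySem.List.pySetD b j 0)
          (PySem.List.pySetD (parts.map f) (k : Int) (PySem.List.pyGetD (parts.map f) (k : Int) 0 + 1))
      else PySem.List.pySetD (parts.map f) (k : Int) (PySem.List.pyGetD (parts.map f) (k : Int) 0 + 1))
      = (parts.map f).take k ++ (f parts[k] + 1) :: List.replicate (parts.length - k - 1) 0 := by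
    rw [hset]
    by_cases hcase : (k : Int) < (parts.length : Int) - 1
    · rw [if_pos hcase]
      have h1 : (k : Int) + 1 = ((k + 1 : Nat) : Int) := by omega
      rw [h1, ← hsetlen, zero_fold _ (k + 1) (by rw [hsetlen]; omega)]
      simp only [List.length_set, List.length_map]
      rw [take_succ_set _ k _ (by simpa using hklt), List.append_assoc]
      simp
      omega
    · rw [if_neg hcase]
      have : parts.length - k - 1 = 0 := by omega
      rw [this, List.set_eq_take_append_cons_drop]
      simp only [List.length_map, hklt, if_true, List.replicate_zero]
      congr 1
      congr 1
      rw [List.drop_eq_nil_iff]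
      simp; omega
  rw [hAfinal, pvIdx]
  have hgetD : parts.getD k "" = parts[k] := List.getD_eq_getElem parts "" hklt
  rw [hgetD]
  have htoStr0 : PySem.Int.toStr 0 = "0" := by decide
  simp [List.map_take, htoStr0, hf, Function.comp_def]

theorem main_equiv : ∀ (version : String), Spec_get_possible_version_bumps version (get_possible_version_bumps version) := by
  intro version
  unfold Spec_get_possible_version_bumps get_possible_version_bumps get_possible_version_bumps_alt
  simp only []
  set parts := (PySem.Str.split? version ".").getD [] with hparts
  rw [PySem.List.foldl_append_singleton_eq_map, pvBumpsGo_eq]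
  rw [PySem.List.pyRange_one]
  simp only [Int.sub_zero, Int.toNat_natCast, List.map_map]
  apply List.map_congr_left
  intro k hk
  have hklt : k < parts.length := List.mem_range.mp hk
  have h0k : (0 : Int) + (k : Int) = (k : Int) := by ring
  simpa [h0k, pvF] using a_elem parts k hklt

-- ===== VERDICT (by name: the statement is the Claim_ definition above) =====
theorem get_possible_version_bumps_spec : Claim_equal_get_possible_version_bumps := by
  intro version _ _
  exact main_equiv version
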